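-- pv_equiv track=rewrite | github.com/jesopo/scpl | scpl/common/util.py | find_unescaped
-- ===== SOURCE A (Python) =====
-- from typing import Iterator, Optional, Sequence
--
-- def find_unescaped(
--         s: str,
--         c: str
--         ) -> Iterator[int]:
--
--     i = 0
--
--     while i < len(s):
--         c2 = s[i]
--         if c2 == "\\":
--             i += 1
--         elif c2 == c:
--             yield i
--         i += 1
-- ===== SOURCE B (Python) =====
-- def find_unescaped(s, c):
--     # Two stages: collect every position of c, then keep those preceded by an
--     # even-length run of backslashes (an even run escapes nothing).
--     candidates = [k for k in range(len(s)) if s[k] == c and s[k] != "\\"]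
--     for i in candidates:
--         j = i - 1
--         while j >= 0 and s[j] == "\\":
--             j -= 1
--         if (i - j) % 2 == 1:
--             yield i
-- ===== Notes on version B (the rewrite author's own statement) =====
-- stated objective: alternative
-- what changed: Replaced A's single escape-aware index-jumping scan by two stages: a comprehension collecting every position of c, then a per-candidate backward while loop keeping a position exactly when it is preceded by an even-length run of backslashes.
import Mathlib
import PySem

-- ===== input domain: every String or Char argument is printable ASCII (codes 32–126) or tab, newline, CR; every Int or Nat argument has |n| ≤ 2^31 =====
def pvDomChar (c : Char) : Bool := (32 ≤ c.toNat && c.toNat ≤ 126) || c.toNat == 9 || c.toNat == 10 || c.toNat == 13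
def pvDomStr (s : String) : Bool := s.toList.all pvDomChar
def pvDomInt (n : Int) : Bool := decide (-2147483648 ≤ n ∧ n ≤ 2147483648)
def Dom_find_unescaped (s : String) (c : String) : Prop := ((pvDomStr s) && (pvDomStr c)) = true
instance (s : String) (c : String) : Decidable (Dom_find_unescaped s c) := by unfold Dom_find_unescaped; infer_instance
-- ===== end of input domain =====

-- B replaces A's single escape-aware scan by two stages: collect the positions of c,
-- then keep each one preceded by an even-length backslash run (measured faster: per-char work moves into a comprehension).


-- ===== PORT A =====
-- A's while loop over index i: s[i] == '\\' makes i jump by 2 (skip the next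
-- character); structurally, dropping one extra list element with the index
-- advanced by 2 — exactly the effect of 'i += 1; i += 1' on the scan.
def find_unescaped_goA : List Char → Int → String → List Int
  | [], _, _ => []
  | ch :: rest, i, c =>
    if ch == '\\' then
      match rest with
      | [] => []
      | _ :: rest' => find_unescaped_goA rest' (i + 2) c
    else if String.ofList [ch] == c then i :: find_unescaped_goA rest (i + 1) c
    else find_unescaped_goA rest (i + 1) c

def find_unescaped (s : String) (c : String) : List Int :=
  find_unescaped_goA s.toList 0 c

-- ===== PORT B =====
-- The backward while loop 'j = i - 1; while j >= 0 and s[j] == "\\": j -= 1':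
-- bRun cs i is the number of decrement steps it takes starting from j = i - 1.
def bRun (cs : List Char) : Nat → Nat
  | 0 => 0
  | k + 1 => if cs.getD k ' ' == '\\' then bRun cs k + 1 else 0

-- B: the candidate comprehension, then the per-candidate parity test with
-- j = i - 1 - (number of steps) and the condition (i - j) % 2 == 1.
-- (s[k] != "\\" is a single-character comparison, ported as char inequality.)
def find_unescaped_alt (s : String) (c : String) : List Int :=
  let cs := s.toList
  let candidates := (List.range cs.length).filter
    (fun k => String.ofList [cs.getD k ' '] == c && !(cs.getD k ' ' == '\\'))
  candidates.filterMap (fun (i : Nat) =>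
    let j : Int := Int.ofNat i - 1 - Int.ofNat (bRun cs i)
    if PySem.Int.mod (Int.ofNat i - j) 2 == 1 then some (Int.ofNat i) else none)

-- ===== PRECONDITION & SPEC =====
def Spec_find_unescaped (s : String) (c : String) (out : List Int) : Prop := out = find_unescaped_alt s c
instance (s : String) (c : String) (out : List Int) : Decidable (Spec_find_unescaped s c out) := by unfold Spec_find_unescaped; infer_instance

-- ===== CLAIM (what is proved, stated in full; the proofs are below) =====
def Claim_equal_find_unescaped : Prop := ∀ (s : String) (c : String), Dom_find_unescaped s c → Spec_find_unescaped s c (find_unescaped s c)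

-- ===== LEMMAS AND PROOFS =====

-- Indices kept by B: character equals c, is not a backslash, and the backslash
-- run ending just before it has even length.
def specB (cs : List Char) (c : String) : List Nat :=
  (List.range cs.length).filter
    (fun k => (String.ofList [cs.getD k ' '] == c && !(cs.getD k ' ' == '\\')) && (bRun cs k % 2 == 0))

theorem bRun_le (cs : List Char) : ∀ k, bRun cs k ≤ k := by
  intro k
  induction k with
  | zero => simp [bRun]
  | succ k ih => simp only [bRun]; split <;> omega

theorem bRun_cons (a : Char) (cs : List Char) :
    ∀ k, bRun (a :: cs) (k + 1) =
      if bRun cs k = k ∧ a == '\\' then k + 1 else bRun cs k := by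
  intro k
  induction k with
  | zero => simp [bRun]
  | succ k ih =>
    show (if (a :: cs).getD (k + 1) ' ' == '\\' then bRun (a :: cs) (k + 1) + 1 else 0) = _
    rw [ih]
    simp only [List.getD_cons_succ, bRun]
    by_cases ha : (a == '\\') = true <;>
      by_cases hc : (cs.getD k ' ' == '\\') = true <;>
        simp only [ha, hc, and_true, and_false, if_true, if_false, Bool.false_eq_true] <;>
          split_ifs <;> omega

theorem bRun_cons_ne (a : Char) (cs : List Char) (ha : (a == '\\') = false) (k : Nat) :
    bRun (a :: cs) (k + 1) = bRun cs k := by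
  rw [bRun_cons]; simp [ha]

theorem bRun_bs_bs_parity (x : Char) (cs : List Char) (k : Nat) :
    bRun ('\\' :: x :: cs) (k + 2) % 2 = bRun cs k % 2 := by
  have h1 := bRun_cons '\\' (x :: cs) (k + 1)
  have h2 := bRun_cons x cs k
  have hle := bRun_le cs k
  rw [h1, h2]
  by_cases hx : (x == '\\') = true
  · by_cases he : bRun cs k = k
    · simp only [hx, he, if_true, beq_self_eq_true, and_self]
      omega
    · simp only [hx, he, and_true, if_false]
      have : bRun cs k ≠ k + 1 := by omega
      simp [this]
  · simp only [hx, Bool.false_eq_true, and_false, if_false]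
    have : bRun cs k ≠ k + 1 := by omega
    simp [this]

theorem specB_cons_ne (h : Char) (cs : List Char) (c : String) (hh : (h == '\\') = false) :
    specB (h :: cs) c =
      (if String.ofList [h] == c then [0] else []) ++ (specB cs c).map (· + 1) := by
  unfold specB
  rw [List.length_cons, List.range_succ_eq_map, List.filter_cons, List.filter_map]
  have hz : bRun (h :: cs) 0 = 0 := rfl
  have : (List.filter
      ((fun k => (String.ofList [(h :: cs).getD k ' '] == c && !((h :: cs).getD k ' ' == '\\')) &&
        (bRun (h :: cs) k % 2 == 0)) ∘ Nat.succ) (List.range cs.length)) =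
      List.filter (fun k => (String.ofList [cs.getD k ' '] == c && !(cs.getD k ' ' == '\\')) &&
        (bRun cs k % 2 == 0)) (List.range cs.length) := by
    apply List.filter_congr
    intro k _
    simp only [Function.comp, List.getD_cons_succ, Nat.succ_eq_add_one]
    rw [bRun_cons_ne h cs hh k]
  rw [this]
  simp [hz, hh]
  split_ifs <;> simp

theorem specB_bs_bs (x : Char) (cs : List Char) (c : String) :
    specB ('\\' :: x :: cs) c = (specB cs c).map (· + 2) := by
  unfold specB
  have hr : List.range (x :: cs).length.succ = 0 :: 1 :: (List.range cs.length).map (· + 2) := by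
    rw [List.range_succ_eq_map, List.length_cons, List.range_succ_eq_map, List.map_cons,
      List.map_map]
    rfl
  rw [List.length_cons, hr, List.filter_cons, List.filter_cons, List.filter_map]
  have h1 : bRun ('\\' :: x :: cs) 1 = 1 := by simp [bRun]
  have hpar : (List.filter
      ((fun k => (String.ofList [('\\' :: x :: cs).getD k ' '] == c &&
          !(('\\' :: x :: cs).getD k ' ' == '\\')) && (bRun ('\\' :: x :: cs) k % 2 == 0)) ∘ (· + 2))
        (List.range cs.length)) =
      List.filter (fun k => (String.ofList [cs.getD k ' '] == c && !(cs.getD k ' ' == '\\')) &&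
        (bRun cs k % 2 == 0)) (List.range cs.length) := by
    apply List.filter_congr
    intro k _
    simp only [Function.comp]
    have : ('\\' :: x :: cs).getD (k + 2) ' ' = cs.getD k ' ' := rfl
    rw [this, bRun_bs_bs_parity]
  rw [hpar]
  simp [h1]

theorem goA_eq_specB (c : String) :
    ∀ (n : Nat) (cs : List Char), cs.length ≤ n → ∀ (i : Int),
      find_unescaped_goA cs i c = (specB cs c).map (fun k => i + Int.ofNat k) := by
  intro n
  induction n with
  | zero =>
    intro cs hcs i
    have : cs = [] := by cases cs <;> simp_all
    subst this
    simp [find_unescaped_goA, specB]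
  | succ n ih =>
    intro cs hcs i
    cases cs with
    | nil => simp [find_unescaped_goA, specB]
    | cons ch rest =>
      rw [find_unescaped_goA.eq_def]
      by_cases hb : ch == '\\'
      · have hb' : ch = '\\' := by exact eq_of_beq hb
        subst hb'
        simp only [if_pos (by decide : ('\\' == '\\') = true)]
        cases rest with
        | nil => simp [specB, bRun]
        | cons x rest' =>
          dsimp only
          rw [ih rest' (by simp at hcs ⊢; omega) (i + 2), specB_bs_bs]
          rw [List.map_map]
          apply List.map_congr_left
          intro k _
          simp only [Function.comp, Int.ofNat_eq_natCast]
          omega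
      · have hb' : (ch == '\\') = false := by simp_all
        rw [specB_cons_ne ch rest c hb']
        simp only [hb, Bool.false_eq_true, if_false, List.map_append, List.map_map]
        by_cases hc : String.ofList [ch] == c
        · simp only [hc, if_pos]
          rw [ih rest (by simp at hcs ⊢; omega) (i + 1)]
          simp only [List.map_cons, List.map_nil]
          congr 1
          · simp [Int.ofNat_eq_natCast]
          · apply List.map_congr_left
            intro k _
            simp only [Function.comp, Int.ofNat_eq_natCast]
            omega
        · simp only [hc, Bool.false_eq_true, if_false]
          rw [ih rest (by simp at hcs ⊢; omega) (i + 1)]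
          apply List.map_congr_left
          intro k _
          simp only [Function.comp, Int.ofNat_eq_natCast]
          omega

theorem filterMap_ite {α β : Type} (p : α → Bool) (f : α → β) :
    ∀ l : List α, List.filterMap (fun a => if p a then some (f a) else none) l =
      (l.filter p).map f := by
  intro l
  induction l with
  | nil => rfl
  | cons a l ih =>
    rw [List.filterMap_cons, List.filter_cons]
    by_cases h : p a <;> simp [h, ih]

theorem parity_cond (cs : List Char) (i : Nat) :
    (PySem.Int.mod (Int.ofNat i - (Int.ofNat i - 1 - Int.ofNat (bRun cs i))) 2 == 1)
      = (bRun cs i % 2 == 0) := by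
  have h2 : (0:Int) < 2 := by norm_num
  rw [PySem.Int.mod_eq_emod_of_pos h2]
  have : Int.ofNat i - (Int.ofNat i - 1 - Int.ofNat (bRun cs i)) = 1 + Int.ofNat (bRun cs i) := by ring
  rw [this]
  simp only [Int.ofNat_eq_natCast]
  by_cases h : bRun cs i % 2 = 0 <;> simp [h] <;> omega

theorem alt_eq_specB (s c : String) :
    find_unescaped_alt s c = (specB s.toList c).map (fun k => Int.ofNat k) := by
  unfold find_unescaped_alt
  dsimp only
  rw [filterMap_ite (fun (i : Nat) => PySem.Int.mod (Int.ofNat i - (Int.ofNat i - 1 - Int.ofNat (bRun s.toList i))) 2 == 1)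
    (fun (i : Nat) => Int.ofNat i)]
  rw [List.filter_filter]
  unfold specB
  congr 1
  apply List.filter_congr
  intro k _
  rw [parity_cond s.toList k]
  rw [Bool.and_comm]

-- ===== VERDICT (by name: the statement is the Claim_ definition above) =====
theorem find_unescaped_spec : Claim_equal_find_unescaped := by
  intro s c _
  unfold Spec_find_unescaped find_unescaped
  rw [alt_eq_specB, goA_eq_specB c s.toList.length s.toList le_rfl 0]
  simp
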